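-- pv_equiv track=rewrite | github.com/ilya-maltsev/waffy | learn/waffy_learn/patterns.py | _charset_pattern
-- ===== SOURCE A (Python) =====
-- def _charset_pattern(values: list[str]) -> str:
--     """Fallback: generate a simple charset+length regex."""
--     chars: set[str] = set()
--     for v in values:
--         chars.update(v)
--
--     lengths = [len(v) for v in values]
--     min_len = min(lengths) if lengths else 0
--     max_len = max(lengths) if lengths else 0
--
--     parts = []
--     if any(c.islower() for c in chars):
--         parts.append("a-z")
--     if any(c.isupper() for c in chars):
--         parts.append("A-Z")
--     if any(c.isdigit() for c in chars):
--         parts.append("0-9")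
--
--     special = sorted(c for c in chars
--                      if not c.isalnum() and not c.isspace())
--     for c in special:
--         if c in r"\.^$*+?{}[]|()/":
--             parts.append(f"\\{c}")
--         else:
--             parts.append(c)
--
--     if any(c.isspace() for c in chars):
--         parts.append(r"\s")
--
--     charset = "".join(parts)
--     return f"^[{charset}]{{{min_len},{max_len}}}$"
-- ===== SOURCE B (Python) =====
-- def _charset_pattern(values: list[str]) -> str:
--     """Single-pass rewrite: flags + first-occurrence specials gathered in one
--     sweep over all characters, running min/max over lengths."""
--     has_lower = has_upper = has_digit = has_space = False
--     specials: list[str] = []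
--     for v in values:
--         for c in v:
--             if c.islower():
--                 has_lower = True
--             elif c.isupper():
--                 has_upper = True
--             elif c.isdigit():
--                 has_digit = True
--             elif c.isspace():
--                 has_space = True
--             elif c not in specials:
--                 specials.append(c)
--
--     if values:
--         min_len = max_len = len(values[0])
--         for v in values[1:]:
--             n = len(v)
--             if n < min_len:
--                 min_len = n
--             if max_len < n:
--                 max_len = n
--     else:
--         min_len = max_len = 0
--
--     specials.sort()
--     parts = (
--         (["a-z"] if has_lower else [])
--         + (["A-Z"] if has_upper else [])
--         + (["0-9"] if has_digit else [])
--         + ["\\" + c if c in "\\.^$*+?{}[]|()/" else c for c in specials]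
--         + (["\\s"] if has_space else [])
--     )
--     return "^[" + "".join(parts) + "]{" + str(min_len) + "," + str(max_len) + "}$"
-- ===== Notes on version B (the rewrite author's own statement) =====
-- stated objective: simpler
-- what changed: Replaces the set-then-four-any()-scans with a single pass over all characters maintaining four flags and a first-occurrence specials list (sorted once at the end), and replaces the lengths list + min()/max() with one running min/max loop; parts are assembled by list concatenation instead of sequential appends.
import Mathlib
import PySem

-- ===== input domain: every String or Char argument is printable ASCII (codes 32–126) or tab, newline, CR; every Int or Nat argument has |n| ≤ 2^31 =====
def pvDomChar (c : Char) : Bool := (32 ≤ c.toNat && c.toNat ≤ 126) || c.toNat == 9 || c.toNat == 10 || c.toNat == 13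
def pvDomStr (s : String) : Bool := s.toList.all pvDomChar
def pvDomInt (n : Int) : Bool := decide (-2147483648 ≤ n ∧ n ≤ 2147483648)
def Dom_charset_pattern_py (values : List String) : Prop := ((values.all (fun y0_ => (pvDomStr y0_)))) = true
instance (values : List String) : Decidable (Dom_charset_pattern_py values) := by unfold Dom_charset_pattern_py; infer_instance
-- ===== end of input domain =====

-- ===== PORT A =====
-- B is a single-pass rewrite of A (same output on every input); equivalence proved below.
-- the raw string r"\.^$*+?{}[]|()/" as a character list ('c in s' for a 1-char c is membership)
def pvEsc : List Char := ['\\', '.', '^', '$', '*', '+', '?', '{', '}', '[', ']', '|', '(', ')', '/']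

def charset_pattern_py (values : List String) : String :=
  let chars : PySem.Set Char :=
    values.foldl (fun s v => PySem.Set.update s v.toList) PySem.Set.empty
  let lengths : List Int := values.map (fun v => (PySem.Str.len v : Int))
  let min_len : Int := match PySem.List.min? lengths (fun x => x) with
    | some m => m
    | none => 0
  let max_len : Int := match PySem.List.max? lengths (fun x => x) with
    | some m => m
    | none => 0
  let parts : List (List Char) := []
  let parts := if chars.any PySem.Chars.islower then parts ++ [['a', '-', 'z']] else parts
  let parts := if chars.any PySem.Chars.isupper then parts ++ [['A', '-', 'Z']] else parts
  let parts := if chars.any PySem.Chars.isdigit then parts ++ [['0', '-', '9']] else parts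
  let special : List Char :=
    PySem.List.sorted
      (chars.filter (fun c => !(PySem.Chars.isalnum c) && !(PySem.Chars.isspace c)))
      (fun c => c) false
  let parts := special.foldl
    (fun ps c => if pvEsc.contains c then ps ++ [['\\', c]] else ps ++ [[c]]) parts
  let parts := if chars.any PySem.Chars.isspace then parts ++ [['\\', 's']] else parts
  let charset : List Char := PySem.Chars.join [] parts
  String.ofList ('^' :: '[' :: charset ++ ']' :: '{' :: PySem.Int.toChars min_len
    ++ ',' :: PySem.Int.toChars max_len ++ ['}', '$'])

-- ===== PORT B =====
structure BState where
  hasLower : Bool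
  hasUpper : Bool
  hasDigit : Bool
  hasSpace : Bool
  specials : List Char
deriving Repr, DecidableEq

def bStep (st : BState) (c : Char) : BState :=
  if PySem.Chars.islower c then { st with hasLower := true }
  else if PySem.Chars.isupper c then { st with hasUpper := true }
  else if PySem.Chars.isdigit c then { st with hasDigit := true }
  else if PySem.Chars.isspace c then { st with hasSpace := true }
  else if st.specials.contains c then st
  else { st with specials := st.specials ++ [c] }

def bLen (acc : Int × Int) (v : String) : Int × Int :=
  let n : Int := PySem.Str.len v
  let acc1 := if n < acc.1 then (n, acc.2) else acc
  if acc1.2 < n then (acc1.1, n) else acc1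

def charset_pattern_py_alt (values : List String) : String :=
  let st : BState :=
    values.foldl (fun st v => v.toList.foldl bStep st) ⟨false, false, false, false, []⟩
  let lens : Int × Int :=
    match values with
    | [] => (0, 0)
    | v :: rest => rest.foldl bLen ((PySem.Str.len v : Int), (PySem.Str.len v : Int))
  let specials : List Char := PySem.List.sorted st.specials (fun c => c) false
  let parts : List (List Char) :=
    (if st.hasLower then [['a', '-', 'z']] else [])
    ++ (if st.hasUpper then [['A', '-', 'Z']] else [])
    ++ (if st.hasDigit then [['0', '-', '9']] else [])
    ++ specials.map (fun c => if pvEsc.contains c then ['\\', c] else [c])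
    ++ (if st.hasSpace then [['\\', 's']] else [])
  String.ofList ('^' :: '[' :: PySem.Chars.join [] parts ++ ']' :: '{'
    :: PySem.Int.toChars lens.1 ++ ',' :: PySem.Int.toChars lens.2 ++ ['}', '$'])

-- ===== PRECONDITION & SPEC =====
def Spec_charset_pattern_py (values : List String) (out : String) : Prop := out = charset_pattern_py_alt values
instance (values : List String) (out : String) : Decidable (Spec_charset_pattern_py values out) := by unfold Spec_charset_pattern_py; infer_instance

-- ===== CLAIM (what is proved, stated in full; the proofs are below) =====
def Claim_equal_charset_pattern_py : Prop := ∀ (values : List String), Dom_charset_pattern_py values → Spec_charset_pattern_py values (charset_pattern_py values)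

-- ===== LEMMAS AND PROOFS =====

-- ---- per-character facts: the ASCII classes A and B test are mutually exclusive ----

lemma lower_excl (c : Char) (h : PySem.Chars.islower c = true) :
    PySem.Chars.isupper c = false ∧ PySem.Chars.isdigit c = false ∧
      PySem.Chars.isspace c = false := by
  have h1 : ('a').val.toNat = 97 := by decide
  have h2 : ('z').val.toNat = 122 := by decide
  have h3 : ('A').val.toNat = 65 := by decide
  have h4 : ('Z').val.toNat = 90 := by decide
  have h5 : ('0').val.toNat = 48 := by decide
  have h6 : ('9').val.toNat = 57 := by decide
  simp only [PySem.Chars.islower, PySem.Chars.isupper, PySem.Chars.isdigit,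
    PySem.Chars.isspace, Char.le_def, Char.toNat, Bool.and_eq_true, Bool.or_eq_false_iff,
    Bool.and_eq_false_iff, decide_eq_true_eq, decide_eq_false_iff_not,
    not_le, UInt32.le_iff_toNat_le, h1, h2, h3, h4, h5, h6] at *
  omega

lemma upper_excl (c : Char) (h : PySem.Chars.isupper c = true) :
    PySem.Chars.isdigit c = false ∧ PySem.Chars.isspace c = false := by
  have h3 : ('A').val.toNat = 65 := by decide
  have h4 : ('Z').val.toNat = 90 := by decide
  have h5 : ('0').val.toNat = 48 := by decide
  have h6 : ('9').val.toNat = 57 := by decide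
  simp only [PySem.Chars.isupper, PySem.Chars.isdigit, PySem.Chars.isspace, Char.le_def,
    Char.toNat, Bool.and_eq_true, Bool.or_eq_false_iff, Bool.and_eq_false_iff,
    decide_eq_true_eq, decide_eq_false_iff_not, not_le,
    UInt32.le_iff_toNat_le, h3, h4, h5, h6] at *
  omega

lemma digit_excl (c : Char) (h : PySem.Chars.isdigit c = true) :
    PySem.Chars.isspace c = false := by
  have h5 : ('0').val.toNat = 48 := by decide
  have h6 : ('9').val.toNat = 57 := by decide
  simp only [PySem.Chars.isdigit, PySem.Chars.isspace, Char.le_def, Char.toNat,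
    Bool.and_eq_true, Bool.or_eq_false_iff, Bool.and_eq_false_iff,
    decide_eq_true_eq, decide_eq_false_iff_not, not_le, UInt32.le_iff_toNat_le,
    h5, h6] at *
  omega

-- the elif-chain guard of B equals A's filter predicate
lemma pElse_eq (c : Char) :
    (!PySem.Chars.islower c && !PySem.Chars.isupper c && !PySem.Chars.isdigit c &&
        !PySem.Chars.isspace c) =
      (!(PySem.Chars.isalnum c) && !(PySem.Chars.isspace c)) := by
  simp only [PySem.Chars.isalnum, PySem.Chars.isalpha]
  cases hl : PySem.Chars.islower c <;> cases hu : PySem.Chars.isupper c <;>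
    cases hd : PySem.Chars.isdigit c <;> cases hs : PySem.Chars.isspace c <;> simp

-- ---- A's char-collection loop is set(flatten) ----

lemma chars_flat (values : List String) (s : PySem.Set Char) :
    values.foldl (fun s v => PySem.Set.update s v.toList) s =
      PySem.Set.update s (values.flatMap (fun v => v.toList)) := by
  induction values generalizing s with
  | nil => simp [PySem.Set.update_nil]
  | cons v rest ih =>
      simp only [List.foldl_cons, List.flatMap_cons, ih, PySem.Set.update_append]

lemma set_any (cs : List Char) (p : Char → Bool) :
    (PySem.Set.ofList cs).any p = cs.any p := by
  rw [Bool.eq_iff_iff]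
  simp [List.any_eq_true, PySem.Set.mem_ofList]

-- ---- B's scan loop: the four flags and the first-occurrence specials ----

lemma bscan (cs : List Char) (st : BState) :
    cs.foldl bStep st =
      ⟨st.hasLower || cs.any PySem.Chars.islower,
       st.hasUpper || cs.any PySem.Chars.isupper,
       st.hasDigit || cs.any PySem.Chars.isdigit,
       st.hasSpace || cs.any PySem.Chars.isspace,
       PySem.Set.update st.specials
         (cs.filter (fun c => !(PySem.Chars.isalnum c) && !(PySem.Chars.isspace c)))⟩ := by
  induction cs generalizing st with
  | nil => simp [PySem.Set.update_nil]
  | cons c rest ih =>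
      simp only [List.foldl_cons, List.any_cons, List.filter_cons]
      rw [← pElse_eq c]
      by_cases hl : PySem.Chars.islower c = true
      · obtain ⟨e1, e2, e3⟩ := lower_excl c hl
        simp only [bStep, hl, if_true, ih]
        simp [e1, e2, e3]
      · by_cases hu : PySem.Chars.isupper c = true
        · obtain ⟨e1, e2⟩ := upper_excl c hu
          simp only [bStep, hl, hu, if_true, ih]
          simp [e1, e2]
        · by_cases hd : PySem.Chars.isdigit c = true
          · have e1 := digit_excl c hd
            simp only [bStep, hl, hu, hd, if_true, ih]
            simp [e1]
          · by_cases hs : PySem.Chars.isspace c = true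
            · simp only [bStep, hl, hu, hd, hs, if_true, ih]
              simp
            · simp only [Bool.not_eq_true] at hl hu hd hs
              have hstep : bStep st c = { st with specials := PySem.Set.add st.specials c } := by
                simp only [bStep, hl, hu, hd, hs, Bool.false_eq_true, if_false,
                  PySem.Set.add, PySem.Set.contains]
                split <;> rfl
              simp only [hstep, ih]
              simp [hl, hu, hd, hs, PySem.Set.update_cons]

-- ---- the sorted specials agree ----

lemma specials_eq (cs : List Char) (q : Char → Bool) :
    PySem.List.sorted ((PySem.Set.ofList cs).filter q) (fun c => c) false =
      PySem.List.sorted (PySem.Set.ofList (cs.filter q)) (fun c => c) false := by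
  apply PySem.List.sorted_eq_sorted_of_perm _ _ _ (fun a b h => h)
  rw [List.perm_ext_iff_of_nodup (List.Nodup.filter _ (PySem.Set.nodup_ofList cs))
    (PySem.Set.nodup_ofList _)]
  intro a
  simp [List.mem_filter, PySem.Set.mem_ofList]

-- ---- the running min/max loop of B ----

lemma bLen_step (a b : Int) (v : String) :
    bLen (a, b) v = (min a (PySem.Str.len v : Int), max b (PySem.Str.len v : Int)) := by
  simp only [bLen, min_def, max_def]
  split_ifs <;> simp_all <;> omega

lemma bLen_fold (l : List String) (a b : Int) :
    l.foldl bLen (a, b) =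
      ((l.map (fun v => (PySem.Str.len v : Int))).foldl min a,
       (l.map (fun v => (PySem.Str.len v : Int))).foldl max b) := by
  induction l generalizing a b with
  | nil => rfl
  | cons v rest ih => simp only [List.foldl_cons, List.map_cons, bLen_step, ih]

-- ---- A's escape loop is an append of a map ----

lemma escape_fold (special : List Char) (parts : List (List Char)) :
    special.foldl
        (fun ps c => if pvEsc.contains c then ps ++ [['\\', c]] else ps ++ [[c]]) parts =
      parts ++ special.map (fun c => if pvEsc.contains c then ['\\', c] else [c]) := by
  have hf : (fun (ps : List (List Char)) c =>
      if pvEsc.contains c then ps ++ [['\\', c]] else ps ++ [[c]]) =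
      fun ps c => ps ++ [if pvEsc.contains c then ['\\', c] else [c]] := by
    funext ps c; split <;> rfl
  rw [hf, PySem.List.foldl_append_singleton_eq_map]

lemma if_append {α : Type} (b : Prop) [Decidable b] (p x : List α) :
    (if b then p ++ x else p) = p ++ if b then x else [] := by
  split <;> simp

-- ---- main equivalence ----

lemma main_eq (values : List String) : charset_pattern_py values = charset_pattern_py_alt values := by
  unfold charset_pattern_py charset_pattern_py_alt
  rw [chars_flat, ← List.foldl_flatMap, bscan]
  simp only [PySem.Set.update_empty, PySem.Set.update_nil_left]
  rw [specials_eq, escape_fold]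
  simp only [set_any]
  -- min/max
  cases values with
  | nil => rfl
  | cons v rest =>
      simp only [bLen_fold, List.map_cons, PySem.List.min?_id_cons, PySem.List.max?_id_cons]
      simp only [if_append, List.nil_append, List.append_assoc]
      set cs := List.flatMap (fun v => v.toList) (v :: rest) with hcs
      set M := List.map (fun c => if pvEsc.contains c = true then ['\\', c] else [c])
        (PySem.List.sorted
          (PySem.Set.ofList
            (List.filter (fun c => !PySem.Chars.isalnum c && !PySem.Chars.isspace c) cs))
          fun c => c) with hM
      cases hL : cs.any PySem.Chars.islower <;> cases hU : cs.any PySem.Chars.isupper <;>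
        cases hD : cs.any PySem.Chars.isdigit <;> cases hS : cs.any PySem.Chars.isspace <;>
          simp

-- ===== VERDICT (by name: the statement is the Claim_ definition above) =====
theorem charset_pattern_py_spec : Claim_equal_charset_pattern_py := by
  intro values _
  exact main_eq values
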